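-- pv_equiv track=rewrite | github.com/jhuang234/TradingAgents | tradingagents/graph/checkpoint.py | _normalize_completed_stages
-- ===== SOURCE A (Python) =====
-- LEGACY_STAGE_MAPPINGS = {
--     "risk_and_portfolio": ["risk_debate", "portfolio_decision"],
-- }
--
-- def _normalize_completed_stages(stage_names: list[str]) -> list[str]:
--     normalized: list[str] = []
--     for stage_name in stage_names:
--         mapped = LEGACY_STAGE_MAPPINGS.get(stage_name, [stage_name])
--         for resolved_name in mapped:
--             if resolved_name not in normalized:
--                 normalized.append(resolved_name)
--     return normalized
-- ===== SOURCE B (Python) =====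
-- LEGACY_STAGE_MAPPINGS = {
--     "risk_and_portfolio": ["risk_debate", "portfolio_decision"],
-- }
--
-- def _normalize_completed_stages(stage_names: list[str]) -> list[str]:
--     # Process the stages BACK-TO-FRONT: maintain the normalized result for the
--     # already-processed suffix, and for each earlier stage prepend its expansion
--     # while subtracting it from the suffix result (earlier occurrences win).
--     # Correct because each expansion (a mapping value or a singleton) has no
--     # internal duplicates, so first-occurrence order is exactly "head, then the
--     # suffix result minus the head".
--     result: list[str] = []
--     for name in reversed(stage_names):
--         head = LEGACY_STAGE_MAPPINGS.get(name, [name])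
--         result = head + [x for x in result if x not in head]
--     return result
-- ===== Notes on version B (the rewrite author's own statement) =====
-- stated objective: alternative
-- what changed: Replaces A's forward loop that grows one dedup accumulator with repeated membership tests by a right fold: iterate the stages in reverse, and at each step prepend the stage's expansion and subtract it from the suffix's normalized result.
import Mathlib
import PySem

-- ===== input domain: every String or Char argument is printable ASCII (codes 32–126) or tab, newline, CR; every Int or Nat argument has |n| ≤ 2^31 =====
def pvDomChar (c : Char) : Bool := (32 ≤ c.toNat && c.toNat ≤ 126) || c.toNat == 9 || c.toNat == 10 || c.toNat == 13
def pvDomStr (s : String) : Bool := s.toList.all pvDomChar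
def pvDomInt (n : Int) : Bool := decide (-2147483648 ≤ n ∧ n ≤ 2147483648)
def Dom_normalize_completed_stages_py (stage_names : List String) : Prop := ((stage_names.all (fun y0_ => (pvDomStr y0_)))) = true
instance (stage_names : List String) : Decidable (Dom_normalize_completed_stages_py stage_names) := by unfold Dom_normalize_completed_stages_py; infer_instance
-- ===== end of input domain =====

-- B replaces A's forward loop with one growing dedup accumulator by a reverse iteration (right fold): each stage's expansion is prepended and subtracted from the suffix's result (objective: alternative, same cost).

-- ===== PORT A =====
def LEGACY_STAGE_MAPPINGS : PySem.Dict String (List String) :=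
  PySem.Dict.insert (PySem.Dict.empty) "risk_and_portfolio" ["risk_debate", "portfolio_decision"]

def normalize_completed_stages_py (stage_names : List String) : List String :=
  stage_names.foldl (fun normalized stage_name =>
    let mapped := PySem.Dict.getD LEGACY_STAGE_MAPPINGS stage_name [stage_name]
    mapped.foldl (fun normalized resolved_name =>
      if normalized.contains resolved_name then normalized else normalized ++ [resolved_name]) normalized) []

-- ===== PORT B =====
def normalize_completed_stages_py_alt (stage_names : List String) : List String :=
  stage_names.reverse.foldl (fun result name =>
    let head := PySem.Dict.getD LEGACY_STAGE_MAPPINGS name [name]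
    head ++ result.filter (fun x => !head.contains x)) []

-- ===== PRECONDITION & SPEC =====
def Spec_normalize_completed_stages_py (stage_names : List String) (out : List String) : Prop := out = normalize_completed_stages_py_alt stage_names
instance (stage_names : List String) (out : List String) : Decidable (Spec_normalize_completed_stages_py stage_names out) := by unfold Spec_normalize_completed_stages_py; infer_instance

-- ===== CLAIM (what is proved, stated in full; the proofs are below) =====
def Claim_equal_normalize_completed_stages_py : Prop := ∀ (stage_names : List String), Dom_normalize_completed_stages_py stage_names → Spec_normalize_completed_stages_py stage_names (normalize_completed_stages_py stage_names)

-- ===== LEMMAS AND PROOFS =====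

-- the expansion of one stage name, and its two possible values
theorem mapped_eq (s : String) :
    PySem.Dict.getD LEGACY_STAGE_MAPPINGS s [s]
      = if s = "risk_and_portfolio" then ["risk_debate", "portfolio_decision"] else [s] := by
  simp [LEGACY_STAGE_MAPPINGS, PySem.Dict.getD_insert, PySem.Dict.getD_empty]

theorem mapped_nodup (s : String) :
    (PySem.Dict.getD LEGACY_STAGE_MAPPINGS s [s]).Nodup := by
  rw [mapped_eq]; split_ifs <;> simp

-- A's inner loop over a duplicate-free mapped list appends exactly the new elements
theorem inner_eq (l : List String) (acc : List String) (hnd : l.Nodup) :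
    l.foldl (fun normalized resolved_name =>
      if normalized.contains resolved_name then normalized else normalized ++ [resolved_name]) acc
      = acc ++ l.filter (fun x => !acc.contains x) := by
  induction l generalizing acc with
  | nil => simp
  | cons x t ih =>
    simp only [List.foldl_cons]
    rcases List.nodup_cons.mp hnd with ⟨hx, ht⟩
    by_cases hmem : acc.contains x
    · rw [if_pos hmem, ih acc ht]
      have hx' : x ∈ acc := by simpa [List.contains_eq_mem] using hmem
      simp [hx']
    · rw [if_neg hmem, ih _ ht]
      have hfil : t.filter (fun y => !(acc ++ [x]).contains y)
          = t.filter (fun y => !acc.contains y) := by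
        apply List.filter_congr
        intro y hy
        have hyx : y ≠ x := fun h => hx (h ▸ hy)
        simp [hyx]
      rw [hfil]
      have hx' : x ∉ acc := by simpa [List.contains_eq_mem] using hmem
      simp [hx']

-- the key invariant: A's outer fold from a duplicate-free accumulator appends
-- exactly the B-result of the remaining stages minus the accumulator
theorem outer_eq (xs : List String) (acc : List String) (hnd : acc.Nodup) :
    xs.foldl (fun normalized stage_name =>
      let mapped := PySem.Dict.getD LEGACY_STAGE_MAPPINGS stage_name [stage_name]
      mapped.foldl (fun normalized resolved_name =>
        if normalized.contains resolved_name then normalized else normalized ++ [resolved_name]) normalized) acc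
      = acc ++ (xs.foldr (fun name res =>
          let head := PySem.Dict.getD LEGACY_STAGE_MAPPINGS name [name]
          head ++ res.filter (fun x => !head.contains x)) []).filter (fun x => !acc.contains x) := by
  induction xs generalizing acc with
  | nil => simp
  | cons s t ih =>
    simp only [List.foldl_cons, List.foldr_cons]
    set h := PySem.Dict.getD LEGACY_STAGE_MAPPINGS s [s] with hh
    set B := t.foldr (fun name res =>
        let head := PySem.Dict.getD LEGACY_STAGE_MAPPINGS name [name]
        head ++ res.filter (fun x => !head.contains x)) [] with hB
    rw [inner_eq h acc (mapped_nodup s)]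
    have hnd' : (acc ++ h.filter (fun x => !acc.contains x)).Nodup := by
      apply List.Nodup.append hnd ((mapped_nodup s).filter _)
      intro a ha hb
      have := List.of_mem_filter hb
      simp only [Bool.not_eq_true', List.contains_eq_mem, decide_eq_false_iff_not] at this
      exact this ha
    rw [ih _ hnd']
    rw [List.append_assoc, List.filter_append]
    congr 2
    rw [List.filter_filter]
    apply List.filter_congr
    intro y hy
    by_cases hya : y ∈ acc <;> by_cases hyh : y ∈ h <;>
      simp [List.contains_eq_mem, List.mem_filter, hya, hyh]

-- ===== VERDICT (by name: the statement is the Claim_ definition above) =====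
theorem normalize_completed_stages_py_spec : Claim_equal_normalize_completed_stages_py := by
  intro stage_names _
  unfold Spec_normalize_completed_stages_py normalize_completed_stages_py normalize_completed_stages_py_alt
  rw [List.foldl_reverse]
  rw [outer_eq stage_names [] List.nodup_nil]
  simp
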